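-- pv_equiv track=rewrite | github.com/Moisesjr20/gueclaw | .agents/skills/advocacia-ce-scraper/scripts/valida_emails.py | email_eh_generico
-- ===== SOURCE A (Python) =====
-- def email_eh_generico(email):
--     """Verifica se é email genérico (não personalizado)"""
--     usuarios_genericos = [
--         'contato', 'contato1', 'contato2',
--         'info', 'information',
--         'admin', 'administrador',
--         'suporte', 'support',
--         'vendas', 'sales', 'comercial',
--         'atendimento', 'atendimento1',
--         'email', 'mail', 'e-mail',
--         'webmaster', 'hostmaster',
--         'postmaster', 'root',
--         'test', 'teste', 'example', 'exemplo'
--     ]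
--
--     usuario = email.split('@')[0].lower()
--     return any(gen in usuario for gen in usuarios_genericos)
-- ===== SOURCE B (Python) =====
-- # Only keywords that are not substrings of another keyword need checking:
-- # 'contato1','contato2' contain 'contato'; 'information' contains 'info';
-- # 'administrador' contains 'admin'; 'atendimento1' contains 'atendimento';
-- # 'email'/'e-mail' contain 'mail'; 'teste' contains 'test'.
-- MINIMAL = [
--     'contato', 'info', 'admin', 'suporte', 'support',
--     'vendas', 'sales', 'comercial', 'atendimento', 'mail',
--     'webmaster', 'hostmaster', 'postmaster', 'root',
--     'test', 'example', 'exemplo'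
-- ]
--
-- def email_eh_generico(email):
--     """Suffix scan with the minimal keyword set: walk the username once and at
--     each position test whether a minimal keyword starts there."""
--     u = email.split('@')[0].lower()
--     i = 0
--     while True:
--         for g in MINIMAL:
--             if u.startswith(g, i):
--                 return True
--         if i >= len(u):
--             return False
--         i += 1
-- ===== Notes on version B (the rewrite author's own statement) =====
-- stated objective: alternative
-- what changed: B first reduces the keyword list to the 17 substring-minimal keywords (dropping the 8 that contain another keyword), then replaces the per-keyword full substring scans by one suffix walk over the username testing anchored prefixes at each position.
import Mathlib
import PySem

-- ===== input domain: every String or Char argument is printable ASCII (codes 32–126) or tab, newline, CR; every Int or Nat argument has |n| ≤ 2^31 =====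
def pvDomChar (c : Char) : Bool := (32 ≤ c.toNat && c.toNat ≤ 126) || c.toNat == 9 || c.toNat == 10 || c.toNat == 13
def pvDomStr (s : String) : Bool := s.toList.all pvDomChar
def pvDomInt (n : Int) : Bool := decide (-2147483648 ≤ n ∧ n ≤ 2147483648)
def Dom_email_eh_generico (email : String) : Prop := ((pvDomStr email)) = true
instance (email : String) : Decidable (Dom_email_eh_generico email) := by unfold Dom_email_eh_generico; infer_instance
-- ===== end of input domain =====

-- B keeps only the 17 substring-minimal keywords and matches them by one suffix
-- walk with anchored prefix tests, instead of A's 25 full substring scans; same results.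

-- ===== PORT A =====
def usuariosGenericosA : List String :=
  ["contato", "contato1", "contato2",
   "info", "information",
   "admin", "administrador",
   "suporte", "support",
   "vendas", "sales", "comercial",
   "atendimento", "atendimento1",
   "email", "mail", "e-mail",
   "webmaster", "hostmaster",
   "postmaster", "root",
   "test", "teste", "example", "exemplo"]

def email_eh_generico (email : String) : Bool :=
  -- usuario = email.split('@')[0].lower(); split("@") (nonempty sep) yields ≥ 1 piece, so [0] never raises
  let usuario := PySem.Str.lower (((PySem.Str.split? email "@").getD []).headD "")
  usuariosGenericosA.any (fun gen => PySem.Str.isIn gen usuario)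

-- ===== PORT B =====
def minimalB : List String :=
  ["contato", "info", "admin", "suporte", "support",
   "vendas", "sales", "comercial", "atendimento", "mail",
   "webmaster", "hostmaster", "postmaster", "root",
   "test", "example", "exemplo"]

-- the while-loop of Source B: test keywords anchored at position i (u.startswith(g, i)
-- = the prefix test on u.drop i), stop once i passes the end, else i += 1
def scanB (u : List Char) (i : Nat) : Bool :=
  if minimalB.any (fun g => PySem.Chars.startswith (u.drop i) g.toList) then true
  else if u.length ≤ i then false
  else scanB u (i + 1)
termination_by u.length + 1 - i
decreasing_by omega

def email_eh_generico_alt (email : String) : Bool :=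
  let u := PySem.Str.lower (((PySem.Str.split? email "@").getD []).headD "")
  scanB u.toList 0

-- ===== PRECONDITION & SPEC =====
def Spec_email_eh_generico (email : String) (out : Bool) : Prop := out = email_eh_generico_alt email
instance (email : String) (out : Bool) : Decidable (Spec_email_eh_generico email out) := by unfold Spec_email_eh_generico; infer_instance

-- ===== CLAIM =====
def Claim_equal_email_eh_generico : Prop := ∀ (email : String), Dom_email_eh_generico email → Spec_email_eh_generico email (email_eh_generico email)

-- ===== LEMMAS AND PROOFS =====

-- the indexed walk finds exactly the minimal keywords occurring as an infix of u.drop i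
theorem scanB_iff (u : List Char) (i : Nat) :
    scanB u i = true ↔ ∃ g ∈ minimalB, g.toList <:+: u.drop i := by
  induction hn : u.length + 1 - i using Nat.strong_induction_on generalizing i with
  | _ n ih =>
  rw [scanB]
  split_ifs with h hle
  · simp only [List.any_eq_true, PySem.Chars.startswith_iff] at h
    obtain ⟨g, hg, hp⟩ := h
    exact iff_of_true rfl ⟨g, hg, hp.isInfix⟩
  · have hd : u.drop i = [] := List.drop_eq_nil_of_le hle
    simp only [List.any_eq_true, PySem.Chars.startswith_iff, hd, not_exists, not_and] at h
    constructor
    · intro hfalse; exact absurd hfalse (by simp)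
    · rintro ⟨g, hg, hinf⟩
      exact absurd (List.infix_nil.mp (hd ▸ hinf) ▸ List.nil_prefix) (hd ▸ h g hg)
  · rw [ih (u.length + 1 - (i + 1)) (by omega) (i + 1) rfl]
    simp only [List.any_eq_true, PySem.Chars.startswith_iff, not_exists, not_and] at h
    have hstep : u.drop (i + 1) = (u.drop i).tail := by
      rw [List.tail_drop]
    obtain ⟨c, t, hct⟩ : ∃ c t, u.drop i = c :: t := by
      cases hd : u.drop i with
      | nil => exact absurd (List.drop_eq_nil_iff.mp hd) (by omega)
      | cons c t => exact ⟨c, t, rfl⟩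
    rw [hstep, hct]
    simp only [List.tail_cons]
    constructor
    · rintro ⟨g, hg, hi⟩; exact ⟨g, hg, hi.trans (List.suffix_cons c t).isInfix⟩
    · rintro ⟨g, hg, hi⟩
      rcases (List.infix_cons_iff).1 hi with hp | hi'
      · exact absurd hp (hct ▸ h g hg)
      · exact ⟨g, hg, hi'⟩

-- every keyword of A's list contains some minimal keyword as a substring
theorem full_has_min :
    ∀ k ∈ usuariosGenericosA, ∃ m ∈ minimalB, m.toList <:+: k.toList := by decide

theorem min_sub_full : ∀ m ∈ minimalB, m ∈ usuariosGenericosA := by decide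

-- full-list substring search ≡ minimal-list substring search
theorem full_iff_min (u : List Char) :
    (∃ g ∈ usuariosGenericosA, g.toList <:+: u) ↔ (∃ g ∈ minimalB, g.toList <:+: u) := by
  constructor
  · rintro ⟨k, hk, hi⟩
    obtain ⟨m, hm, hmk⟩ := full_has_min k hk
    exact ⟨m, hm, hmk.trans hi⟩
  · rintro ⟨m, hm, hi⟩
    exact ⟨m, min_sub_full m hm, hi⟩

-- ===== VERDICT =====
theorem email_eh_generico_spec : Claim_equal_email_eh_generico := by
  intro email _
  unfold Spec_email_eh_generico email_eh_generico email_eh_generico_alt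
  apply Bool.eq_iff_iff.mpr
  rw [scanB_iff]
  simp only [List.drop_zero]
  simp only [List.any_eq_true, PySem.Str.isIn_iff_infix]
  exact full_iff_min _
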